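-- pv_equiv track=rewrite | github.com/Karapsin/Yandex_algo_training | HA5/H_test.py | fast_sol
-- ===== SOURCE A (Python) =====
-- def change_dict(dict, key, value):
--     if key not in dict:
--         dict[key] = 0
--
--     dict[key] = dict[key] + value
--
--     return dict
--
-- def is_dict_ok(dict, k):
--     result = True
--     for key in dict:
--         if dict[key] > k:
--             result = False
--             break
--     return result
--
-- def fast_sol(input_str, k, n):
--     left = 0
--     right = 1
--     best_length = -1
--     best_start = -1
--     str_dict = change_dict(dict(), input_str[0], 1)
--
--     while right < n:
--         str_dict = change_dict(str_dict, input_str[right], 1)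
--         if is_dict_ok(str_dict, k):
--             right = right + 1
--         else:
--             if (right - left) > best_length:
--                 best_length = right - left
--                 best_start = left + 1
--
--             str_dict = change_dict(str_dict, input_str[left], -1)
--
--             left = left + 1
--             right = right + 1
--
--     if (right - left) > best_length:
--         best_length = right - left
--         best_start = left + 1
--
--     return (best_length, best_start)
-- ===== SOURCE B (Python) =====
-- def _bump(cnt, over, c, delta, k):
--     # adjust count of c by delta, keeping over = number of keys whose count exceeds k
--     old = cnt.get(c, 0)
--     if c in cnt and old > k:
--         over -= 1
--     cnt[c] = old + delta
--     if old + delta > k: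
--         over += 1
--     return over
--
-- def fast_sol(input_str, k, n):
--     left = 0
--     w = 1                       # current window size; the window starts holding input_str[0]
--     best_length = -1
--     best_start = -1
--     cnt = {input_str[0]: 1}
--     over = 1 if 1 > k else 0
--     for i in range(1, n):
--         over = _bump(cnt, over, input_str[i], 1, k)
--         if over != 0:
--             if w > best_length:
--                 best_length = w
--                 best_start = left + 1
--             over = _bump(cnt, over, input_str[left], -1, k)
--             left += 1           # slide: size unchanged
--         else:
--             w += 1              # grow
--     if w > best_length:
--         best_length = w
--         best_start = left + 1
--     return (best_length, best_start)
-- ===== Notes on version B (the rewrite author's own statement) =====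
-- stated objective: alternative
-- what changed: A re-scans the entire character-count dict (is_dict_ok) after every step; B maintains the number of characters whose count exceeds k incrementally, so the inner scan disappears, and B tracks the window by (left, size) in a single for-loop instead of A's while-loop over a (left, right) pointer pair with duplicated right+=1 branches.
import Mathlib
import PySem

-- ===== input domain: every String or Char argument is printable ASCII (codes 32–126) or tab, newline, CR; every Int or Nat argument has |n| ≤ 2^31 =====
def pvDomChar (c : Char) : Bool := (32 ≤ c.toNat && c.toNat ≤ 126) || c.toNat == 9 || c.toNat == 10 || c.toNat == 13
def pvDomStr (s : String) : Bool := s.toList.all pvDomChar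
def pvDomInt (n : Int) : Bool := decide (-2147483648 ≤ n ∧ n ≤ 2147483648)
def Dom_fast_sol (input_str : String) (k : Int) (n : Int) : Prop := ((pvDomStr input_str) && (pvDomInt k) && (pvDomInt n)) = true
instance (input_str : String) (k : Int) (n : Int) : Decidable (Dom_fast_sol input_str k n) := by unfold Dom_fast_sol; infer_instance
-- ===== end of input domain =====

-- B replaces A's per-step full-dict validity rescan (is_dict_ok) by an incrementally
-- maintained count of characters whose count exceeds k, and tracks the window by
-- (left, size) in a single for-loop instead of A's (left, right) while-loop; same result.

-- ===== PORT A =====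
def change_dict (d : PySem.Dict Char Int) (key : Char) (value : Int) : PySem.Dict Char Int :=
  let d1 := if d.contains key then d else d.insert key 0
  -- Python's dict[key] read: key is present here, so it is getD key 0
  d1.insert key (d1.getD key 0 + value)

def is_dict_ok_go (d : PySem.Dict Char Int) (k : Int) : List Char → Bool
  | [] => true
  | key :: rest => if d.getD key 0 > k then false else is_dict_ok_go d k rest

def is_dict_ok (d : PySem.Dict Char Int) (k : Int) : Bool := is_dict_ok_go d k d.keys

-- A's while loop; input_str[i] is in range under Pre_, ported as pyGetD (total form)
def fastLoopA (s : List Char) (k n : Int) (left right best_length best_start : Int)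
    (d : PySem.Dict Char Int) : Int × Int :=
  if _h : right < n then
    let d' := change_dict d (PySem.List.pyGetD s right ' ') 1
    if is_dict_ok d' k then
      fastLoopA s k n left (right + 1) best_length best_start d'
    else
      let bl := if right - left > best_length then right - left else best_length
      let bs := if right - left > best_length then left + 1 else best_start
      let d'' := change_dict d' (PySem.List.pyGetD s left ' ') (-1)
      fastLoopA s k n (left + 1) (right + 1) bl bs d''
  else
    if right - left > best_length then (right - left, left + 1) else (best_length, best_start)
termination_by (n - right).toNat
decreasing_by all_goals omega

def fast_sol (input_str : String) (k : Int) (n : Int) : Int × Int :=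
  let s := input_str.toList
  fastLoopA s k n 0 1 (-1) (-1) (change_dict PySem.Dict.empty (PySem.List.pyGetD s 0 ' ') 1)

-- ===== PORT B =====
def bump (cnt : PySem.Dict Char Int) (ov : Int) (c : Char) (delta k : Int) :
    PySem.Dict Char Int × Int :=
  let old := cnt.getD c 0
  let ov1 := if cnt.contains c && decide (old > k) then ov - 1 else ov
  let cnt' := cnt.insert c (old + delta)
  let ov2 := if old + delta > k then ov1 + 1 else ov1
  (cnt', ov2)

-- B's loop state: (left, w, best_length, best_start, cnt, over)
def stepB (s : List Char) (k : Int)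
    (st : Int × Int × Int × Int × PySem.Dict Char Int × Int) (i : Int) :
    Int × Int × Int × Int × PySem.Dict Char Int × Int :=
  let (left, w, bl, bs, cnt, ov) := st
  let (cnt1, ov1) := bump cnt ov (PySem.List.pyGetD s i ' ') 1 k
  if ov1 ≠ 0 then
    let bl' := if w > bl then w else bl
    let bs' := if w > bl then left + 1 else bs
    let (cnt2, ov2) := bump cnt1 ov1 (PySem.List.pyGetD s left ' ') (-1) k
    (left + 1, w, bl', bs', cnt2, ov2)
  else
    (left, w + 1, bl, bs, cnt1, ov1)

def fast_sol_alt (input_str : String) (k : Int) (n : Int) : Int × Int :=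
  let s := input_str.toList
  let c0 := PySem.List.pyGetD s 0 ' '
  let init : Int × Int × Int × Int × PySem.Dict Char Int × Int :=
    (0, 1, -1, -1, (PySem.Dict.empty).insert c0 1, if (1 : Int) > k then 1 else 0)
  let fin := (PySem.List.pyRange 1 n 1).foldl (stepB s k) init
  if fin.2.1 > fin.2.2.1 then (fin.2.1, fin.1 + 1) else (fin.2.2.1, fin.2.2.2.1)

-- ===== PRECONDITION & SPEC =====
-- Pre_ = exactly the inputs on which Python A returns: a nonempty string (it reads
-- input_str[0]) and n ≤ len(input_str) (the loop reads input_str[right] for every right < n).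
def Pre_fast_sol (input_str : String) (_k : Int) (n : Int) : Prop :=
  input_str.toList ≠ [] ∧ n ≤ input_str.toList.length
instance (input_str : String) (k : Int) (n : Int) : Decidable (Pre_fast_sol input_str k n) := by
  unfold Pre_fast_sol; infer_instance

def pvWitness_fast_sol : String × Int × Int := ("aab", 1, 3)

def Spec_fast_sol (input_str : String) (k : Int) (n : Int) (out : Int × Int) : Prop := out = fast_sol_alt input_str k n
instance (input_str : String) (k : Int) (n : Int) (out : Int × Int) : Decidable (Spec_fast_sol input_str k n out) := by unfold Spec_fast_sol; infer_instance

-- ===== CLAIM (what is proved, stated in full; the proofs are below) =====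
def Claim_equal_fast_sol : Prop := ∀ (input_str : String) (k : Int) (n : Int), Dom_fast_sol input_str k n → Pre_fast_sol input_str k n → Spec_fast_sol input_str k n (fast_sol input_str k n)

-- ===== LEMMAS AND PROOFS =====

-- the quantity B's `ov` tracks: the number of keys whose count exceeds k
def overC (d : PySem.Dict Char Int) (k : Int) : Int :=
  (d.keys.countP (fun x => decide (d.getD x 0 > k)) : Nat)

theorem change_dict_eq (d : PySem.Dict Char Int) (c : Char) (v : Int) :
    change_dict d c v = d.insert c (d.getD c 0 + v) := by
  unfold change_dict
  by_cases h : d.contains c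
  · simp [h]
  · simp only [Bool.not_eq_true] at h
    rw [PySem.Dict.getD_of_not_contains d 0 h]
    simp [h, PySem.Dict.getD_insert_self, PySem.Dict.insert_insert_self]

theorem is_dict_ok_go_eq (d : PySem.Dict Char Int) (k : Int) (l : List Char) :
    is_dict_ok_go d k l = decide (l.countP (fun x => decide (d.getD x 0 > k)) = 0) := by
  induction l with
  | nil => simp [is_dict_ok_go]
  | cons x rest ih =>
    by_cases h : d.getD x 0 > k
    · simp [is_dict_ok_go, h]
    · simp [is_dict_ok_go, h, ih]

theorem is_dict_ok_eq (d : PySem.Dict Char Int) (k : Int) :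
    is_dict_ok d k = decide (overC d k = 0) := by
  rw [is_dict_ok, is_dict_ok_go_eq]
  simp [overC]

theorem countP_congr_single {α : Type} [DecidableEq α] (l : List α) (c : α)
    (q q' : α → Bool) (hnd : l.Nodup) (hc : c ∈ l)
    (h : ∀ x ∈ l, x ≠ c → q' x = q x) :
    l.countP q' + (if q c then 1 else 0) = l.countP q + (if q' c then 1 else 0) := by
  induction l with
  | nil => simp at hc
  | cons a rest ih =>
    rcases List.mem_cons.mp hc with rfl | hmem
    · have hnot : c ∉ rest := (List.nodup_cons.mp hnd).1
      have : rest.countP q' = rest.countP q := by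
        apply List.countP_congr
        intro x hx
        rw [h x (List.mem_cons_of_mem _ hx) (fun e => hnot (e ▸ hx))]
      simp [List.countP_cons, this]
      omega
    · have hne : a ≠ c := fun e => (List.nodup_cons.mp hnd).1 (e ▸ hmem)
      have ha : q' a = q a := h a (List.mem_cons_self) hne
      have := ih (List.nodup_cons.mp hnd).2 hmem
        (fun x hx => h x (List.mem_cons_of_mem _ hx))
      simp [List.countP_cons, ha]
      omega

theorem overC_insert (d : PySem.Dict Char Int) (k : Int) (c : Char) (v : Int)
    (hnd : d.keys.Nodup) :
    overC (d.insert c v) k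
      = overC d k - (if d.contains c && decide (d.getD c 0 > k) then 1 else 0)
        + (if v > k then 1 else 0) := by
  by_cases hc : d.contains c
  · have hmem : c ∈ d.keys := by
      rw [PySem.Dict.contains_eq_decide_mem_keys] at hc; simpa using hc
    have hkeys := PySem.Dict.keys_insert_of_contains d v hc
    have hstep := countP_congr_single d.keys c
      (fun x => decide (d.getD x 0 > k))
      (fun x => decide ((d.insert c v).getD x 0 > k)) hnd hmem
      (by intro x hx hne
          simp [PySem.Dict.getD_insert, hne])
    simp only [PySem.Dict.getD_insert_self] at hstep
    unfold overC
    rw [hkeys]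
    simp only [hc, Bool.true_and]
    split_ifs at hstep ⊢ <;> simp_all <;> omega
  · have hc' : d.contains c = false := by simpa using hc
    have hkeys := PySem.Dict.keys_insert_of_not_contains d v hc'
    have hnotmem : c ∉ d.keys := fun hm => by
      rw [PySem.Dict.contains_eq_decide_mem_keys] at hc'; simp [hm] at hc'
    have hsame : d.keys.countP (fun x => decide ((d.insert c v).getD x 0 > k))
        = d.keys.countP (fun x => decide (d.getD x 0 > k)) := by
      apply List.countP_congr
      intro x hx
      have hne : x ≠ c := fun e => hnotmem (e ▸ hx)
      rw [PySem.Dict.getD_insert]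
      simp [hne]
    unfold overC
    rw [hkeys]
    rw [List.countP_append, hsame]
    simp only [hc', Bool.false_and]
    simp only [List.countP_cons, List.countP_nil, PySem.Dict.getD_insert_self]
    split_ifs <;> simp_all

theorem bump_spec (d : PySem.Dict Char Int) (k : Int) (c : Char) (δ : Int)
    (hnd : d.keys.Nodup) :
    bump d (overC d k) c δ k
      = (d.insert c (d.getD c 0 + δ), overC (d.insert c (d.getD c 0 + δ)) k) := by
  unfold bump
  simp only [Prod.mk.injEq]
  refine ⟨trivial, ?_⟩
  rw [overC_insert d k c (d.getD c 0 + δ) hnd]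
  split_ifs <;> omega

theorem overC_single (c : Char) (k : Int) :
    overC ((PySem.Dict.empty).insert c 1) k = if (1 : Int) > k then 1 else 0 := by
  unfold overC
  rw [PySem.Dict.keys_insert_of_not_contains _ _ (PySem.Dict.contains_empty c)]
  simp [PySem.Dict.keys_empty, List.countP_cons, PySem.Dict.getD_insert_self]

def finishB (st : Int × Int × Int × Int × PySem.Dict Char Int × Int) : Int × Int :=
  if st.2.1 > st.2.2.1 then (st.2.1, st.1 + 1) else (st.2.2.1, st.2.2.2.1)

theorem loop_eq (s : List Char) (k n : Int) :
    ∀ (right left bl bs : Int) (d : PySem.Dict Char Int), d.keys.Nodup →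
    fastLoopA s k n left right bl bs d =
      finishB ((PySem.List.pyRange right n 1).foldl (stepB s k)
        (left, right - left, bl, bs, d, overC d k)) := by
  intro right left bl bs d
  fun_induction fastLoopA s k n left right bl bs d
  case case1 =>
    rename_i left right bl bs d hlt d' hok ih
    intro hnd
    have hd' : d' = d.insert (PySem.List.pyGetD s right ' ')
        (d.getD (PySem.List.pyGetD s right ' ') 0 + 1) := change_dict_eq _ _ _
    have hnd' : d'.keys.Nodup := by
      rw [hd']; exact PySem.Dict.nodup_keys_insert _ _ _ hnd
    have h0 : overC d' k = 0 := by
      rw [is_dict_ok_eq] at hok; simpa using hok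
    have hstep : stepB s k (left, right - left, bl, bs, d, overC d k) right
        = (left, (right + 1) - left, bl, bs, d', overC d' k) := by
      simp only [stepB]
      rw [bump_spec d k (PySem.List.pyGetD s right ' ') 1 hnd, ← hd']
      simp [h0]
      omega
    rw [PySem.List.pyRange_one_cons hlt, List.foldl_cons, hstep, ih hnd']
  case case2 =>
    rename_i left right bl bs d hlt d' hok bl' bs' d'' ih
    intro hnd
    have hd' : d' = d.insert (PySem.List.pyGetD s right ' ')
        (d.getD (PySem.List.pyGetD s right ' ') 0 + 1) := change_dict_eq _ _ _
    have hnd' : d'.keys.Nodup := by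
      rw [hd']; exact PySem.Dict.nodup_keys_insert _ _ _ hnd
    have hd'' : d'' = d'.insert (PySem.List.pyGetD s left ' ')
        (d'.getD (PySem.List.pyGetD s left ' ') 0 + (-1)) := change_dict_eq _ _ _
    have hnd'' : d''.keys.Nodup := by
      rw [hd'']; exact PySem.Dict.nodup_keys_insert _ _ _ hnd'
    have h0 : overC d' k ≠ 0 := by
      rw [is_dict_ok_eq] at hok; simpa using hok
    have hstep : stepB s k (left, right - left, bl, bs, d, overC d k) right
        = (left + 1, (right + 1) - (left + 1), bl', bs', d'', overC d'' k) := by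
      simp only [stepB]
      rw [bump_spec d k (PySem.List.pyGetD s right ' ') 1 hnd, ← hd']
      simp only [h0, ne_eq, not_false_eq_true, if_true]
      rw [bump_spec d' k (PySem.List.pyGetD s left ' ') (-1) hnd', ← hd'']
      have h1 : (right + 1) - (left + 1) = right - left := by omega
      rw [h1]
      rfl
    rw [PySem.List.pyRange_one_cons hlt, List.foldl_cons, hstep, ih hnd'']
  case case3 =>
    rename_i left right bl bs d hge hgt
    intro _
    have hr : PySem.List.pyRange right n 1 = [] := by
      simp [PySem.List.pyRange]; omega
    rw [hr]
    simp [finishB, hgt]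
  case case4 =>
    rename_i left right bl bs d hge hgt
    intro _
    have hr : PySem.List.pyRange right n 1 = [] := by
      simp [PySem.List.pyRange]; omega
    rw [hr]
    simp [finishB, hgt]


-- ===== VERDICT (by name: the statement is the Claim_ definition above) =====
theorem fast_sol_spec : Claim_equal_fast_sol := by
  intro input_str k n _ _
  unfold Spec_fast_sol
  have hA : fast_sol input_str k n
      = fastLoopA input_str.toList k n 0 1 (-1) (-1)
        ((PySem.Dict.empty).insert (PySem.List.pyGetD input_str.toList 0 ' ') 1) := by
    show fastLoopA _ _ _ _ _ _ _ (change_dict PySem.Dict.empty (PySem.List.pyGetD input_str.toList 0 ' ') 1) = _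
    rw [change_dict_eq]
    simp [PySem.Dict.getD_empty]
  rw [hA, loop_eq _ _ _ 1 0 (-1) (-1) _
    (PySem.Dict.nodup_keys_insert _ _ _ PySem.Dict.nodup_keys_empty), overC_single]
  rfl
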